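-- pv_equiv track=rewrite | github.com/RideGreg/LeetCode | Python/5366.py | suffixQuery
-- ===== SOURCE A (Python) =====
-- def suffixQuery(s):
--     n, ans = len(s), 1
--     dp = [0]*n
--     dp[-1] = 1
--     for i in reversed(range(n-1)):
--         for j in reversed(range(i, n)):
--             dp[j] = 0
--             if s[i] == s[j]:
--                 if j<=i+1:
--                     dp[j] = j-i+1
--                 else:
--                     dp[j] = dp[j-1] + (2 if dp[j-1] == j-i-1 else 1)
--                 ans += dp[j]
--     return ans
-- ===== SOURCE B (Python) =====
-- def suffixQuery(s):
--     # Expand around each palindrome center, carrying the chain value and a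
--     # "still a palindrome" flag, instead of A's reversed dp-table sweep.
--     n = len(s)
--     total = n
--     for c in range(n):  # odd-length arms centered at c
--         cur, pal = 1, True
--         for d in range(1, min(c, n - 1 - c) + 1):
--             if s[c - d] == s[c + d]:
--                 cur += 2 if pal else 1
--                 total += cur
--             else:
--                 cur, pal = 0, False
--     for c in range(n - 1):  # even centers between c and c+1
--         cur, pal = 0, True
--         for d in range(min(c, n - 2 - c) + 1):
--             if s[c - d] == s[c + 1 + d]:
--                 cur += 2 if pal else 1
--                 total += cur
--             else:
--                 cur, pal = 0, False
--     return total
-- ===== Notes on version B (the rewrite author's own statement) =====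
-- stated objective: alternative
-- what changed: A fills a 1-D dp table by a reversed double sweep over (i, j) pairs; B traverses the same pairs grouped by palindrome center, expanding outward while carrying a running chain value and a boolean palindromicity flag, with no dp array and no reversed iteration.
import Mathlib
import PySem

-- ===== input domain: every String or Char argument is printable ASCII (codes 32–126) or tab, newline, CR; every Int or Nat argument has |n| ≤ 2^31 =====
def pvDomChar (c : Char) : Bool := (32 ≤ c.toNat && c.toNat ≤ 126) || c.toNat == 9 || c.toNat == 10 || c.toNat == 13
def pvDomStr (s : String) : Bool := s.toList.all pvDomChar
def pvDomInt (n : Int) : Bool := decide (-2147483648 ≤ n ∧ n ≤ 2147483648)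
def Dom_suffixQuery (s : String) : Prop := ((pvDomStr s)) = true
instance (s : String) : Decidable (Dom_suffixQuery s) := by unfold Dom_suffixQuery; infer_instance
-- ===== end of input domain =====

-- B replaces A's reversed dp-table sweep by an expand-around-center scan that carries a running
-- chain value and a palindrome flag per center; a different traversal of the same O(n^2) work.
-- A mutates no argument; the equivalence is about the return value.

-- ===== PORT A =====
-- every index A uses (s[i], s[j], dp[j], dp[j-1], dp[-1]) is in range once s is nonempty
-- (guaranteed by Pre_), so the defaulting getters/setters below are exact there
def aInner (cs : List Char) (i : Nat) (st : List Int × Int) (j : Nat) : List Int × Int :=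
  let dp := st.1.set j 0
  if cs.getD i ' ' = cs.getD j ' ' then
    if j ≤ i + 1 then
      (dp.set j ((j : Int) - i + 1), st.2 + ((j : Int) - i + 1))
    else
      let p := dp.getD (j - 1) 0
      let v := p + (if p = (j : Int) - i - 1 then 2 else 1)
      (dp.set j v, st.2 + v)
  else (dp, st.2)

def aRow (cs : List Char) (st : List Int × Int) (i : Nat) : List Int × Int :=
  ((List.range' i (cs.length - i)).reverse).foldl (aInner cs i) st

def suffixQuery (s : String) : Int :=
  -- n = len(s); dp = [0]*n; dp[-1] = 1; ans = 1; for i in reversed(range(n-1)): row i; return ans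
  (((List.range (s.toList.length - 1)).reverse).foldl (aRow s.toList)
    ((List.replicate s.toList.length (0 : Int)).set (s.toList.length - 1) 1, 1)).2

-- ===== PORT B =====
-- one expansion step at the pair (a, b); st = (cur, pal, total)
def bStep (cs : List Char) (a b : Nat) (st : Int × Bool × Int) : Int × Bool × Int :=
  if cs.getD a ' ' = cs.getD b ' ' then
    (st.1 + (if st.2.1 then 2 else 1), st.2.1, st.2.2 + (st.1 + (if st.2.1 then 2 else 1)))
  else (0, false, st.2.2)

def bOdd (cs : List Char) (total : Int) (c : Nat) : Int :=
  ((List.range' 1 (min c (cs.length - 1 - c))).foldl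
    (fun st d => bStep cs (c - d) (c + d) st) (1, true, total)).2.2

def bEven (cs : List Char) (total : Int) (c : Nat) : Int :=
  ((List.range (min c (cs.length - 2 - c) + 1)).foldl
    (fun st d => bStep cs (c - d) (c + 1 + d) st) (0, true, total)).2.2

def suffixQuery_alt (s : String) : Int :=
  -- total = n; odd centers then even centers; return total
  (List.range (s.toList.length - 1)).foldl (bEven s.toList)
    ((List.range s.toList.length).foldl (bOdd s.toList) (s.toList.length : Int))

-- ===== PRECONDITION & SPEC =====
-- Pre_ excludes only the empty string, on which A raises IndexError (dp[-1] on an empty list).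
def Pre_suffixQuery (s : String) : Prop := s ≠ ""
instance (s : String) : Decidable (Pre_suffixQuery s) := by unfold Pre_suffixQuery; infer_instance
def pvWitness_suffixQuery : String := "abcba"

def Spec_suffixQuery (s : String) (out : Int) : Prop := out = suffixQuery_alt s
instance (s : String) (out : Int) : Decidable (Spec_suffixQuery s out) := by unfold Spec_suffixQuery; infer_instance

-- ===== CLAIM (what is proved, stated in full; the proofs are below) =====
def Claim_equal_suffixQuery : Prop := ∀ (s : String), Dom_suffixQuery s → Pre_suffixQuery s → Spec_suffixQuery s (suffixQuery s)

-- ===== LEMMAS AND PROOFS =====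

-- the chain value both programs compute: A stores Fc cs i j in dp[j] after row i,
-- B rebuilds the same chain outward around each center
def Fc (cs : List Char) (i j : Nat) : Int :=
  if cs.getD i ' ' ≠ cs.getD j ' ' then 0
  else if j ≤ i + 1 then (j : Int) - i + 1
  else Fc cs (i + 1) (j - 1) + (if Fc cs (i + 1) (j - 1) = (j : Int) - i - 1 then 2 else 1)
termination_by j - i
decreasing_by omega

lemma Fc_diag (cs : List Char) (i : Nat) : Fc cs i i = 1 := by
  rw [Fc]; simp

lemma Fc_degen (cs : List Char) (i : Nat) : Fc cs (i + 1) i = 0 := by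
  rw [Fc]
  split
  · rfl
  · rw [if_pos (by omega : i ≤ i + 1 + 1)]; push_cast; ring

lemma Fc_le (cs : List Char) : ∀ (i j : Nat), i ≤ j → Fc cs i j ≤ (j : Int) - i + 1 := by
  intro i j
  induction i, j using Fc.induct cs with
  | case1 i j h => intro hij; rw [Fc, if_pos h]; omega
  | case2 i j h hb => intro hij; rw [Fc, if_neg h, if_pos hb]
  | case3 i j h hb ih =>
    intro hij
    rw [Fc, if_neg h, if_neg hb]
    have h2 : i + 1 ≤ j - 1 := by omega
    have := ih h2
    have hc : ((j - 1 : Nat) : Int) = (j : Int) - 1 := by omega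
    rw [hc] at this
    split <;> omega

lemma sum_map_range' (f : ℕ → ℤ) : ∀ (m a : ℕ),
    ((List.range' a m).map f).sum = ∑ x ∈ Finset.Ico a (a + m), f x := by
  intro m
  induction m with
  | zero => simp
  | succ m ih =>
    intro a
    rw [List.range'_succ]
    simp only [List.map_cons, List.sum_cons, ih (a + 1)]
    rw [Finset.sum_eq_sum_Ico_succ_bot (by omega : a < a + (m + 1))]
    rw [show a + 1 + m = a + (m + 1) from by omega]

lemma sum_map_range (f : ℕ → ℤ) (n : ℕ) :
    ((List.range n).map f).sum = ∑ x ∈ Finset.range n, f x := by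
  rw [List.range_eq_range', sum_map_range', Finset.range_eq_Ico]
  norm_num

lemma getD_set_self (l : List Int) (j : Nat) (v : Int) (h : j < l.length) :
    (l.set j v).getD j 0 = v := by
  simp [List.getD_eq_getElem?_getD, h]

lemma getD_set_ne (l : List Int) (j k : Nat) (v : Int) (h : j ≠ k) :
    (l.set j v).getD k 0 = l.getD k 0 := by
  simp [List.getD_eq_getElem?_getD, List.getElem?_set_ne h]

lemma aInner_step (cs : List Char) (i j : Nat) (dp : List Int) (a : Int)
    (hlen : dp.length = cs.length) (hj : j < cs.length)
    (hread : i + 2 ≤ j → dp.getD (j - 1) 0 = Fc cs (i + 1) (j - 1)) :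
    ∃ dp1, aInner cs i (dp, a) j = (dp1, a + Fc cs i j) ∧ dp1.length = cs.length
      ∧ dp1.getD j 0 = Fc cs i j ∧ (∀ k, k ≠ j → dp1.getD k 0 = dp.getD k 0) := by
  have hjd : j < dp.length := by omega
  have hjd2 : j < (dp.set j (0 : Int)).length := by simpa using hjd
  simp only [aInner]
  by_cases hm : cs.getD i ' ' = cs.getD j ' '
  · rw [if_pos hm]
    by_cases hb : j ≤ i + 1
    · have hF : Fc cs i j = (j : Int) - i + 1 := by
        rw [Fc, if_neg (not_not_intro hm), if_pos hb]
      rw [if_pos hb]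
      refine ⟨_, by rw [hF], by simp [hlen], ?_, ?_⟩
      · rw [getD_set_self _ _ _ hjd2, hF]
      · intro k hk
        rw [getD_set_ne _ _ _ _ (Ne.symm hk), getD_set_ne _ _ _ _ (Ne.symm hk)]
    · have hne : j - 1 ≠ j := by omega
      have hp : (dp.set j 0).getD (j - 1) 0 = Fc cs (i + 1) (j - 1) := by
        rw [getD_set_ne _ _ _ _ (Ne.symm hne)]
        exact hread (by omega)
      have hF : Fc cs i j
          = (dp.set j 0).getD (j - 1) 0
            + (if (dp.set j 0).getD (j - 1) 0 = (j : Int) - i - 1 then 2 else 1) := by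
        rw [Fc, if_neg (not_not_intro hm), if_neg hb, hp]
      rw [if_neg hb]
      refine ⟨_, by rw [hF], by simp [hlen], ?_, ?_⟩
      · rw [getD_set_self _ _ _ hjd2, hF]
      · intro k hk
        rw [getD_set_ne _ _ _ _ (Ne.symm hk), getD_set_ne _ _ _ _ (Ne.symm hk)]
  · rw [if_neg hm]
    have hF : Fc cs i j = 0 := by rw [Fc, if_pos hm]
    refine ⟨dp.set j 0, by simp [hF], by simp [hlen], ?_, ?_⟩
    · rw [getD_set_self _ _ _ hjd, hF]
    · intro k hk
      rw [getD_set_ne _ _ _ _ (Ne.symm hk)]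

lemma aInner_spec (cs : List Char) (i : Nat) : ∀ (m : Nat) (dp : List Int) (a : Int),
    dp.length = cs.length → i + m ≤ cs.length →
    (∀ k, i + 1 ≤ k → k + 2 ≤ i + m → dp.getD k 0 = Fc cs (i + 1) k) →
    ∃ dp', ((List.range' i m).reverse.foldl (aInner cs i) (dp, a))
        = (dp', a + ((List.range' i m).map (Fc cs i)).sum)
      ∧ dp'.length = cs.length
      ∧ (∀ k, dp'.getD k 0 = if i ≤ k ∧ k < i + m then Fc cs i k else dp.getD k 0) := by
  intro m
  induction m with
  | zero =>
    intro dp a hlen _ _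
    exact ⟨dp, by simp, hlen, fun k => by rw [if_neg (by omega)]⟩
  | succ m ih =>
    intro dp a hlen hle hread
    have hconcat : (List.range' i (m + 1)).reverse = (i + m) :: (List.range' i m).reverse := by
      rw [List.range'_1_concat]; simp
    rw [hconcat, List.foldl_cons]
    obtain ⟨dp1, hstep, hlen1, hset1, hother1⟩ :=
      aInner_step cs i (i + m) dp a hlen (by omega)
        (fun h2 => hread (i + m - 1) (by omega) (by omega))
    rw [hstep]
    obtain ⟨dp', hfold, hlen', hchar⟩ := ih dp1 (a + Fc cs i (i + m)) hlen1 (by omega)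
      (fun k hk1 hk2 => by
        rw [hother1 k (by omega)]
        exact hread k hk1 (by omega))
    refine ⟨dp', ?_, hlen', ?_⟩
    · rw [hfold, List.range'_1_concat]
      simp only [List.map_append, List.sum_append, List.map_cons, List.sum_cons, List.map_nil,
        List.sum_nil]
      ring_nf
    · intro k
      rw [hchar k]
      by_cases h1 : i ≤ k ∧ k < i + m
      · rw [if_pos h1, if_pos (by omega)]
      · rw [if_neg h1]
        by_cases h2 : k = i + m
        · subst h2
          rw [if_pos (by omega), hset1]
        · rw [if_neg (by omega), hother1 k h2]

lemma aOuter_spec (cs : List Char) : ∀ (t : Nat) (dp : List Int) (a : Int),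
    t + 1 ≤ cs.length → dp.length = cs.length →
    (∀ k, t ≤ k → k < cs.length → dp.getD k 0 = Fc cs t k) →
    (((List.range t).reverse).foldl (aRow cs) (dp, a)).2
      = a + ((List.range t).map (fun i => ((List.range' i (cs.length - i)).map (Fc cs i)).sum)).sum := by
  intro t
  induction t with
  | zero => intro dp a _ _ _; simp
  | succ t ih =>
    intro dp a hlt hlen hinv
    rw [List.range_succ]
    simp only [List.reverse_append, List.reverse_cons, List.reverse_nil, List.nil_append,
      List.cons_append, List.foldl_cons]
    have hrow := aInner_spec cs t (cs.length - t) dp a hlen (by omega)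
      (fun k hk1 hk2 => hinv k (by omega) (by omega))
    obtain ⟨dp', hfold, hlen', hchar⟩ := hrow
    have : aRow cs (dp, a) t = (dp', a + ((List.range' t (cs.length - t)).map (Fc cs t)).sum) := by
      rw [aRow, hfold]
    rw [this]
    rw [ih dp' _ (by omega) hlen'
      (fun k hk1 hk2 => by rw [hchar k, if_pos (by omega)])]
    rw [List.map_append, List.sum_append]
    simp
    ring_nf

lemma A_closed (cs : List Char) (hn : 1 ≤ cs.length) :
    (((List.range (cs.length - 1)).reverse).foldl (aRow cs)
        ((List.replicate cs.length (0 : Int)).set (cs.length - 1) 1, 1)).2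
      = 1 + ∑ i ∈ Finset.range (cs.length - 1), ∑ j ∈ Finset.Ico i cs.length, Fc cs i j := by
  rw [aOuter_spec cs (cs.length - 1) _ 1 (by omega) (by simp)
      (fun k hk1 hk2 => by
        have hkeq : k = cs.length - 1 := by omega
        subst hkeq
        rw [getD_set_self _ _ _ (by simp; omega)]; exact (Fc_diag cs _).symm)]
  rw [sum_map_range]
  refine congrArg (1 + ·) (Finset.sum_congr rfl (fun i hi => ?_))
  have hi' : i < cs.length - 1 := Finset.mem_range.mp hi
  rw [sum_map_range', show i + (cs.length - i) = cs.length from by omega]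

lemma Fc_odd_step (cs : List Char) (c t0 : Nat) (h1 : t0 + 1 ≤ c) :
    Fc cs (c - (t0 + 1)) (c + (t0 + 1))
      = if cs.getD (c - (t0 + 1)) ' ' = cs.getD (c + (t0 + 1)) ' '
        then Fc cs (c - t0) (c + t0) + (if Fc cs (c - t0) (c + t0) = 2 * t0 + 1 then 2 else 1)
        else 0 := by
  rw [Fc]
  by_cases hm : cs.getD (c - (t0 + 1)) ' ' = cs.getD (c + (t0 + 1)) ' '
  · rw [if_neg (not_not_intro hm), if_pos hm, if_neg (by omega)]
    have e1 : c - (t0 + 1) + 1 = c - t0 := by omega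
    have e2 : c + (t0 + 1) - 1 = c + t0 := by omega
    have e3 : ((c + (t0 + 1) : Nat) : Int) - ((c - (t0 + 1) : Nat) : Int) - 1 = 2 * t0 + 1 := by
      omega
    rw [e1, e2, e3]
  · rw [if_pos hm, if_neg hm]

lemma bOdd_inner (cs : List Char) (c : Nat) (hc : c < cs.length) :
    ∀ (m t0 : Nat) (cur : Int) (pal : Bool) (total : Int),
    t0 + m ≤ min c (cs.length - 1 - c) →
    cur = Fc cs (c - t0) (c + t0) →
    (pal = true ↔ cur = 2 * t0 + 1) →
    ((List.range' (t0 + 1) m).foldl (fun st d => bStep cs (c - d) (c + d) st) (cur, pal, total)).2.2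
      = total + ((List.range' (t0 + 1) m).map (fun d => Fc cs (c - d) (c + d))).sum := by
  intro m
  induction m with
  | zero => intro t0 cur pal total _ _ _; simp
  | succ m ih =>
    intro t0 cur pal total hb hcur hpal
    have h1 : t0 + 1 ≤ c := by omega
    have h2 : c + (t0 + 1) < cs.length := by omega
    rw [List.range'_succ, List.foldl_cons, List.map_cons, List.sum_cons]
    have hstep := Fc_odd_step cs c t0 h1
    have hle : Fc cs (c - t0) (c + t0) ≤ 2 * t0 + 1 := by
      have := Fc_le cs (c - t0) (c + t0) (by omega)
      have e : ((c + t0 : Nat) : Int) - ((c - t0 : Nat) : Int) + 1 = 2 * t0 + 1 := by omega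
      omega
    by_cases hm : cs.getD (c - (t0 + 1)) ' ' = cs.getD (c + (t0 + 1)) ' '
    · rw [if_pos hm] at hstep
      have hite : (if pal then (2 : Int) else 1) = (if Fc cs (c - t0) (c + t0) = 2 * t0 + 1 then 2 else 1) := by
        by_cases hp : pal
        · rw [if_pos hp, if_pos (by rw [← hcur]; exact hpal.mp hp)]
        · rw [if_neg hp, if_neg (fun heq => hp (hpal.mpr (by rw [hcur]; exact heq)))]
      have hcur' : cur + (if pal then (2 : Int) else 1) = Fc cs (c - (t0 + 1)) (c + (t0 + 1)) := by
        rw [hstep, hcur, hite]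
      have hpal' : (pal = true ↔ cur + (if pal then (2 : Int) else 1) = 2 * (t0 + 1) + 1) := by
        by_cases hp : pal
        · rw [if_pos hp]
          have := hpal.mp hp
          exact ⟨fun _ => by omega, fun _ => hp⟩
        · rw [if_neg hp]
          have hne : cur ≠ 2 * t0 + 1 := fun heq => hp (hpal.mpr heq)
          constructor
          · intro hpp; exact absurd hpp hp
          · intro h; exfalso; rw [hcur] at hne h; omega
      rw [show bStep cs (c - (t0 + 1)) (c + (t0 + 1)) (cur, pal, total)
            = (cur + (if pal then (2 : Int) else 1), pal,
               total + (cur + (if pal then (2 : Int) else 1))) from by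
          simp only [bStep, if_pos hm]]
      rw [ih (t0 + 1) _ pal _ (by omega) hcur' hpal']
      rw [← hcur']
      ring
    · rw [if_neg hm] at hstep
      rw [show bStep cs (c - (t0 + 1)) (c + (t0 + 1)) (cur, pal, total) = (0, false, total) from by
          simp only [bStep, if_neg hm]]
      rw [ih (t0 + 1) 0 false total (by omega) hstep.symm
        ⟨fun h => by simp at h, fun h => absurd h (by omega)⟩]
      rw [hstep]
      ring

lemma Fc_even_step (cs : List Char) (c t0 : Nat) (h1 : t0 ≤ c) :
    Fc cs (c - t0) (c + 1 + t0)
      = if cs.getD (c - t0) ' ' = cs.getD (c + 1 + t0) ' '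
        then Fc cs (c + 1 - t0) (c + t0) + (if Fc cs (c + 1 - t0) (c + t0) = 2 * t0 then 2 else 1)
        else 0 := by
  rw [Fc]
  by_cases hm : cs.getD (c - t0) ' ' = cs.getD (c + 1 + t0) ' '
  · rw [if_neg (not_not_intro hm), if_pos hm]
    by_cases ht : t0 = 0
    · subst ht
      rw [if_pos (by omega)]
      simp only [Nat.sub_zero, Nat.add_zero, Fc_degen cs c]
      push_cast
      norm_num
    · rw [if_neg (by omega)]
      have e1 : c - t0 + 1 = c + 1 - t0 := by omega
      have e2 : c + 1 + t0 - 1 = c + t0 := by omega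
      have e3 : ((c + 1 + t0 : Nat) : Int) - ((c - t0 : Nat) : Int) - 1 = 2 * t0 := by omega
      rw [e1, e2, e3]
  · rw [if_pos hm, if_neg hm]

lemma Fc_even_le (cs : List Char) (c t0 : Nat) (h1 : t0 ≤ c) :
    Fc cs (c + 1 - t0) (c + t0) ≤ 2 * t0 := by
  by_cases ht : t0 = 0
  · subst ht
    simp only [Nat.sub_zero, Nat.add_zero, Fc_degen cs c]
    norm_num
  · have := Fc_le cs (c + 1 - t0) (c + t0) (by omega)
    have e : ((c + t0 : Nat) : Int) - ((c + 1 - t0 : Nat) : Int) + 1 = 2 * t0 := by omega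
    omega

lemma bEven_inner (cs : List Char) (c : Nat) (hc : c + 1 < cs.length) :
    ∀ (m t0 : Nat) (cur : Int) (pal : Bool) (total : Int),
    t0 + m ≤ min c (cs.length - 2 - c) + 1 →
    cur = Fc cs (c + 1 - t0) (c + t0) →
    (pal = true ↔ cur = 2 * t0) →
    ((List.range' t0 m).foldl (fun st d => bStep cs (c - d) (c + 1 + d) st) (cur, pal, total)).2.2
      = total + ((List.range' t0 m).map (fun d => Fc cs (c - d) (c + 1 + d))).sum := by
  intro m
  induction m with
  | zero => intro t0 cur pal total _ _ _; simp
  | succ m ih =>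
    intro t0 cur pal total hb hcur hpal
    have h1 : t0 ≤ c := by omega
    have h2 : c + 1 + t0 < cs.length := by omega
    rw [List.range'_succ, List.foldl_cons, List.map_cons, List.sum_cons]
    have hstep := Fc_even_step cs c t0 h1
    have hle : Fc cs (c + 1 - t0) (c + t0) ≤ 2 * t0 := Fc_even_le cs c t0 h1
    by_cases hm : cs.getD (c - t0) ' ' = cs.getD (c + 1 + t0) ' '
    · rw [if_pos hm] at hstep
      have hite : (if pal then (2 : Int) else 1)
          = (if Fc cs (c + 1 - t0) (c + t0) = 2 * t0 then 2 else 1) := by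
        by_cases hp : pal
        · rw [if_pos hp, if_pos (by rw [← hcur]; exact hpal.mp hp)]
        · rw [if_neg hp, if_neg (fun heq => hp (hpal.mpr (by rw [hcur]; exact heq)))]
      have hcur' : cur + (if pal then (2 : Int) else 1) = Fc cs (c - t0) (c + 1 + t0) := by
        rw [hstep, hcur, hite]
      have hcur'' : cur + (if pal then (2 : Int) else 1) = Fc cs (c + 1 - (t0 + 1)) (c + (t0 + 1)) := by
        rw [hcur', show c + 1 - (t0 + 1) = c - t0 from by omega,
          show c + (t0 + 1) = c + 1 + t0 from by omega]
      have hpal' : (pal = true ↔ cur + (if pal then (2 : Int) else 1) = 2 * (t0 + 1)) := by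
        by_cases hp : pal
        · rw [if_pos hp]
          have := hpal.mp hp
          exact ⟨fun _ => by omega, fun _ => hp⟩
        · rw [if_neg hp]
          have hne : cur ≠ 2 * t0 := fun heq => hp (hpal.mpr heq)
          constructor
          · intro hpp; exact absurd hpp hp
          · intro h; exfalso; rw [hcur] at hne h; omega
      rw [show bStep cs (c - t0) (c + 1 + t0) (cur, pal, total)
            = (cur + (if pal then (2 : Int) else 1), pal,
               total + (cur + (if pal then (2 : Int) else 1))) from by
          simp only [bStep, if_pos hm]]
      rw [ih (t0 + 1) _ pal _ (by omega) hcur'' hpal']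
      rw [← hcur']
      ring
    · rw [if_neg hm] at hstep
      have hstep' : Fc cs (c + 1 - (t0 + 1)) (c + (t0 + 1)) = 0 := by
        rw [show c + 1 - (t0 + 1) = c - t0 from by omega,
          show c + (t0 + 1) = c + 1 + t0 from by omega, hstep]
      rw [show bStep cs (c - t0) (c + 1 + t0) (cur, pal, total) = (0, false, total) from by
          simp only [bStep, if_neg hm]]
      rw [ih (t0 + 1) 0 false total (by omega) hstep'.symm
        ⟨fun h => by simp at h, fun h => absurd h (by omega)⟩]
      rw [hstep]
      ring

lemma bOdd_eq (cs : List Char) (c : Nat) (hc : c < cs.length) (total : Int) :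
    bOdd cs total c
      = total + ∑ d ∈ Finset.Ico 1 (min c (cs.length - 1 - c) + 1), Fc cs (c - d) (c + d) := by
  rw [bOdd, bOdd_inner cs c hc _ 0 1 true total (by omega)
    (by simpa using (Fc_diag cs c).symm) (by norm_num)]
  rw [sum_map_range']
  norm_num [Nat.add_comm]

lemma bEven_eq (cs : List Char) (c : Nat) (hc : c + 1 < cs.length) (total : Int) :
    bEven cs total c
      = total + ∑ d ∈ Finset.Ico 0 (min c (cs.length - 2 - c) + 1), Fc cs (c - d) (c + 1 + d) := by
  rw [bEven, List.range_eq_range',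
    bEven_inner cs c hc _ 0 0 true total (by omega)
      (by simpa using (Fc_degen cs c).symm) (by norm_num)]
  rw [sum_map_range']
  norm_num

lemma foldl_add_of_mem (l : List Nat) (g : Int → Nat → Int) (h : Nat → Int)
    (H : ∀ c ∈ l, ∀ t, g t c = t + h c) : ∀ t0, l.foldl g t0 = t0 + (l.map h).sum := by
  induction l with
  | nil => intro t0; simp
  | cons x xs ih =>
    intro t0
    rw [List.foldl_cons, List.map_cons, List.sum_cons,
      H x (by simp) t0, ih (fun c hc t => H c (by simp [hc]) t) (t0 + h x)]
    ring

lemma B_closed (cs : List Char) :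
    (List.range (cs.length - 1)).foldl (bEven cs)
        ((List.range cs.length).foldl (bOdd cs) (cs.length : Int))
      = (cs.length : Int)
        + ∑ c ∈ Finset.range cs.length, ∑ d ∈ Finset.Ico 1 (min c (cs.length - 1 - c) + 1), Fc cs (c - d) (c + d)
        + ∑ c ∈ Finset.range (cs.length - 1), ∑ d ∈ Finset.Ico 0 (min c (cs.length - 2 - c) + 1), Fc cs (c - d) (c + 1 + d) := by
  rw [foldl_add_of_mem (List.range cs.length) (bOdd cs) _
    (fun c hc t => bOdd_eq cs c (by simpa using hc) t)]
  rw [foldl_add_of_mem (List.range (cs.length - 1)) (bEven cs) _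
    (fun c hc t => bEven_eq cs c (by have := List.mem_range.mp hc; omega) t)]
  rw [sum_map_range, sum_map_range]

lemma recenter (cs : List Char) (hn : 1 ≤ cs.length) :
    1 + ∑ i ∈ Finset.range (cs.length - 1), ∑ j ∈ Finset.Ico i cs.length, Fc cs i j
      = (cs.length : Int)
        + ∑ c ∈ Finset.range cs.length, ∑ d ∈ Finset.Ico 1 (min c (cs.length - 1 - c) + 1), Fc cs (c - d) (c + d)
        + ∑ c ∈ Finset.range (cs.length - 1), ∑ d ∈ Finset.Ico 0 (min c (cs.length - 2 - c) + 1), Fc cs (c - d) (c + 1 + d) := by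
  set n := cs.length with hdef
  -- peel the diagonal term of each row
  have hdiag : ∀ i ∈ Finset.range (n - 1),
      ∑ j ∈ Finset.Ico i n, Fc cs i j = 1 + ∑ j ∈ Finset.Ico (i + 1) n, Fc cs i j := by
    intro i hi
    have hi' : i < n - 1 := Finset.mem_range.mp hi
    rw [Finset.sum_eq_sum_Ico_succ_bot (by omega : i < n), Fc_diag]
  rw [Finset.sum_congr rfl hdiag, Finset.sum_add_distrib, Finset.sum_const, Finset.card_range]
  have hstrict : ∑ i ∈ Finset.range (n - 1), ∑ j ∈ Finset.Ico (i + 1) n, Fc cs i j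
      = ∑ i ∈ Finset.range n, ∑ j ∈ Finset.Ico (i + 1) n, Fc cs i j := by
    rw [show n = (n - 1) + 1 from by omega, Finset.sum_range_succ]
    simp
  rw [hstrict]
  -- nested sum as a sum over the sigma set of pairs i < j
  rw [← Finset.sum_sigma (Finset.range n) (fun i => Finset.Ico (i + 1) n)
    (fun p => Fc cs p.1 p.2)]
  -- split by parity of i + j
  rw [← Finset.sum_filter_add_sum_filter_not
    ((Finset.range n).sigma (fun i => Finset.Ico (i + 1) n))
    (fun p => (p.1 + p.2) % 2 = 0) (fun p => Fc cs p.1 p.2)]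
  have hodd : ∑ p ∈ ((Finset.range n).sigma (fun i => Finset.Ico (i + 1) n)).filter
        (fun p => (p.1 + p.2) % 2 = 0), Fc cs p.1 p.2
      = ∑ c ∈ Finset.range n, ∑ d ∈ Finset.Ico 1 (min c (n - 1 - c) + 1), Fc cs (c - d) (c + d) := by
    rw [← Finset.sum_sigma (Finset.range n)
      (fun c => Finset.Ico 1 (min c (n - 1 - c) + 1)) (fun q => Fc cs (q.1 - q.2) (q.1 + q.2))]
    refine Finset.sum_nbij' (fun p => ⟨(p.1 + p.2) / 2, (p.2 - p.1) / 2⟩)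
      (fun q => ⟨q.1 - q.2, q.1 + q.2⟩) ?_ ?_ ?_ ?_ ?_
    · intro p hp
      simp only [Finset.mem_filter, Finset.mem_sigma, Finset.mem_range, Finset.mem_Ico] at hp ⊢
      omega
    · intro q hq
      simp only [Finset.mem_filter, Finset.mem_sigma, Finset.mem_range, Finset.mem_Ico] at hq ⊢
      omega
    · intro p hp
      obtain ⟨a, b⟩ := p
      simp only [Finset.mem_filter, Finset.mem_sigma, Finset.mem_range, Finset.mem_Ico] at hp
      obtain ⟨⟨ha, hb1, hb2⟩, hpar⟩ := hp
      simp only [Sigma.mk.injEq, heq_eq_eq]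
      exact ⟨by omega, by omega⟩
    · intro q hq
      obtain ⟨c, d⟩ := q
      simp only [Finset.mem_sigma, Finset.mem_range, Finset.mem_Ico] at hq
      obtain ⟨hc, hd1, hd2⟩ := hq
      simp only [Sigma.mk.injEq, heq_eq_eq]
      exact ⟨by omega, by omega⟩
    · intro p hp
      obtain ⟨a, b⟩ := p
      simp only [Finset.mem_filter, Finset.mem_sigma, Finset.mem_range, Finset.mem_Ico] at hp
      obtain ⟨⟨ha, hb1, hb2⟩, hpar⟩ := hp
      simp only
      rw [show (a + b) / 2 - (b - a) / 2 = a from by omega,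
        show (a + b) / 2 + (b - a) / 2 = b from by omega]
  have heven : ∑ p ∈ ((Finset.range n).sigma (fun i => Finset.Ico (i + 1) n)).filter
        (fun p => ¬(p.1 + p.2) % 2 = 0), Fc cs p.1 p.2
      = ∑ c ∈ Finset.range (n - 1), ∑ d ∈ Finset.Ico 0 (min c (n - 2 - c) + 1), Fc cs (c - d) (c + 1 + d) := by
    rw [← Finset.sum_sigma (Finset.range (n - 1))
      (fun c => Finset.Ico 0 (min c (n - 2 - c) + 1)) (fun q => Fc cs (q.1 - q.2) (q.1 + 1 + q.2))]
    refine Finset.sum_nbij' (fun p => ⟨(p.1 + p.2 - 1) / 2, (p.2 - p.1 - 1) / 2⟩)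
      (fun q => ⟨q.1 - q.2, q.1 + 1 + q.2⟩) ?_ ?_ ?_ ?_ ?_
    · intro p hp
      simp only [Finset.mem_filter, Finset.mem_sigma, Finset.mem_range, Finset.mem_Ico] at hp ⊢
      omega
    · intro q hq
      simp only [Finset.mem_filter, Finset.mem_sigma, Finset.mem_range, Finset.mem_Ico] at hq ⊢
      omega
    · intro p hp
      obtain ⟨a, b⟩ := p
      simp only [Finset.mem_filter, Finset.mem_sigma, Finset.mem_range, Finset.mem_Ico] at hp
      obtain ⟨⟨ha, hb1, hb2⟩, hpar⟩ := hp
      simp only [Sigma.mk.injEq, heq_eq_eq]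
      exact ⟨by omega, by omega⟩
    · intro q hq
      obtain ⟨c, d⟩ := q
      simp only [Finset.mem_sigma, Finset.mem_range, Finset.mem_Ico] at hq
      obtain ⟨hc, hd1, hd2⟩ := hq
      simp only [Sigma.mk.injEq, heq_eq_eq]
      exact ⟨by omega, by omega⟩
    · intro p hp
      obtain ⟨a, b⟩ := p
      simp only [Finset.mem_filter, Finset.mem_sigma, Finset.mem_range, Finset.mem_Ico] at hp
      obtain ⟨⟨ha, hb1, hb2⟩, hpar⟩ := hp
      simp only
      rw [show (a + b - 1) / 2 - (b - a - 1) / 2 = a from by omega,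
        show (a + b - 1) / 2 + 1 + (b - a - 1) / 2 = b from by omega]
  rw [hodd, heven, nsmul_eq_mul, mul_one]
  have hcast : ((n - 1 : Nat) : Int) = (n : Int) - 1 := by omega
  rw [hcast]
  ring

-- ===== VERDICT (by name: the statement is the Claim_ definition above) =====
theorem suffixQuery_spec : Claim_equal_suffixQuery := by
  intro s _ hpre
  unfold Spec_suffixQuery suffixQuery suffixQuery_alt
  have hn : 1 ≤ s.toList.length := by
    rcases Nat.eq_zero_or_pos s.toList.length with h0 | h1
    · exact absurd (String.length_eq_zero_iff.mp h0) hpre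
    · exact h1
  rw [A_closed s.toList hn, recenter s.toList hn, B_closed s.toList]
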